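-- pv_equiv track=rewrite | github.com/dnapreludesys/dcsazure_PostgreSQL_to_PostgreSQL | dcsazure_PostgreSQL_to_PostgreSQL_mask_pl/ADLS_to_PostgreSQL/function_app.py | _python_repr_to_json
-- ===== SOURCE A (Python) =====
-- def _python_repr_to_json(s: str) -> str:
--     """
--     Convert a Python repr-style string to a valid JSON string.
--
--     Rewrites single-quoted strings to double-quoted strings, translates Python
--     literal tokens (True → true, False → false, None → null), and leaves
--     structural characters and numbers unchanged. This is a best-effort
--     character-level transform used as a fallback when json.loads and
--     ast.literal_eval both fail to parse a value that originated as a Python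
--     data-structure repr.
--     """
--     result = []
--     i = 0
--     n = len(s)
--     while i < n:
--         c = s[i]
--         if c == '"':
--             result.append('"')
--             i += 1
--             while i < n:
--                 ch = s[i]
--                 if ch == "\\":
--                     result.append(ch)
--                     i += 1
--                     if i < n:
--                         result.append(s[i])
--                         i += 1
--                 elif ch == '"':
--                     result.append('"')
--                     i += 1
--                     break
--                 else:
--                     result.append(ch)
--                     i += 1
--             continue
--         if c == "'":
--             result.append('"')
--             i += 1
--             while i < n:
--                 ch = s[i]
--                 if ch == "\\":
--                     result.append(ch)
--                     i += 1
--                     if i < n: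
--                         result.append(s[i])
--                         i += 1
--                 elif ch == "'":
--                     result.append('"')
--                     i += 1
--                     break
--                 elif ch == '"':
--                     result.append('\\"')
--                     i += 1
--                 else:
--                     result.append(ch)
--                     i += 1
--             continue
--         if c in "{}[]:,\n\r\t ":
--             result.append(c)
--             i += 1
--             continue
--         j = i
--         while j < n and s[j] not in "{}[]:,\n\r\t '\"":
--             j += 1
--         token = s[i:j]
--         i = j
--         if token == "True":
--             result.append("true")
--         elif token == "False":
--             result.append("false")
--         elif token == "None":
--             result.append("null")
--         else:
--             try:
--                 float(token)
--                 result.append(token)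
--             except ValueError:
--                 result.append('"' + token + '"')
--     return "".join(result)
-- ===== SOURCE B (Python) =====
-- # Two-phase re-implementation: a scanner that only computes segment boundaries
-- # (quoted spans via slicing, structural chars, bare tokens), then a renderer that
-- # maps each segment to its JSON text; output assembled by a single join.
--
-- _STOP = "{}[]:,\n\r\t '\""
-- _STRUCT = "{}[]:,\n\r\t "
--
--
-- def _scan(s):
--     """Classify s into segments: ('dq'|'sq', inner_text, closed) | ('struct', ch, False) | ('bare', token, False)."""
--     segs = []
--     i, n = 0, len(s)
--     while i < n:
--         c = s[i]
--         if c == '"' or c == "'":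
--             j = i + 1
--             closed = False
--             while j < n:
--                 if s[j] == "\\":
--                     j += 2
--                 elif s[j] == c:
--                     closed = True
--                     break
--                 else:
--                     j += 1
--             segs.append(("dq" if c == '"' else "sq", s[i + 1:j], closed))
--             i = j + 1 if closed else n
--         elif c in _STRUCT:
--             segs.append(("struct", c, False))
--             i += 1
--         else:
--             j = i
--             while j < n and s[j] not in _STOP:
--                 j += 1
--             segs.append(("bare", s[i:j], False))
--             i = j
--     return segs
--
--
-- def _escape_dq(t):
--     """Escape unescaped double quotes; backslash pairs pass through verbatim."""
--     out = []
--     k = 0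
--     while k < len(t):
--         if t[k] == "\\":
--             out.append(t[k:k + 2])
--             k += 2
--         elif t[k] == '"':
--             out.append('\\"')
--             k += 1
--         else:
--             out.append(t[k])
--             k += 1
--     return "".join(out)
--
--
-- def _render(kind, text, closed):
--     if kind == "dq":
--         return '"' + text + ('"' if closed else '')
--     if kind == "sq":
--         return '"' + _escape_dq(text) + ('"' if closed else '')
--     if kind == "struct":
--         return text
--     if text == "True":
--         return "true"
--     if text == "False":
--         return "false"
--     if text == "None":
--         return "null"
--     try:
--         float(text)
--         return text
--     except ValueError:
--         return '"' + text + '"'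
--
--
-- def _python_repr_to_json(s: str) -> str:
--     return "".join(_render(k, t, c) for k, t, c in _scan(s))
-- ===== Notes on version B (the rewrite author's own statement) =====
-- stated objective: alternative
-- what changed: A interleaves scanning and output in one emit-as-you-go loop; B first runs a boundary-only scanner that classifies the string into segments (quoted spans found by an escape-aware boundary search and extracted by slicing, structural chars, bare tokens) and then renders each segment independently (with a separate double-quote-escaping pass for single-quoted spans) and joins the pieces.
import Mathlib
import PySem

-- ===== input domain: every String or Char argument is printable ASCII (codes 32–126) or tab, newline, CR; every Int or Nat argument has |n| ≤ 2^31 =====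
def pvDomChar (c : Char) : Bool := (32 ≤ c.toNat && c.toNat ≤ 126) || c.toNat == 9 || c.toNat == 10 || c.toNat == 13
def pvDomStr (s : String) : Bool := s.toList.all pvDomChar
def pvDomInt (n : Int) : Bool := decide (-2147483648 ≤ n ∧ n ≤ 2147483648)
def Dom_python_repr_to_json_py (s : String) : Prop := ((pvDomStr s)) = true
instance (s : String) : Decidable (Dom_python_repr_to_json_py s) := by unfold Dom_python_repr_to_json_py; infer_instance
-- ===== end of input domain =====

-- B re-decomposes A's single interleaved scan into a boundary-only scanner producing
-- classified segments plus a separate per-segment renderer (alternative decomposition,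
-- same cost); return values proved equal on every input.

-- shared helpers: the character classes Python tests with `c in "..."`,
-- and a hand-written exact port of the `float(token)` acceptance test
-- (both Pythons call the float() builtin; exact on the ASCII domain:
-- optional sign, inf/infinity/nan case-insensitive, or decimal number with
-- underscores allowed only between digits and an optional exponent).
def structChars : List Char := ['{', '}', '[', ']', ':', ',', '\n', '\r', '\t', ' ']
def isStructChar (c : Char) : Bool := structChars.contains c
def isStopChar (c : Char) : Bool := (structChars ++ ['\'', '"']).contains c

def pyDigit (c : Char) : Bool := '0' ≤ c && c ≤ '9'

-- consume the tail of a digit run: digits, with '_' allowed only between digits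
def digTail : List Char → List Char
  | '_' :: c :: rest => if pyDigit c then digTail rest else '_' :: c :: rest
  | c :: rest => if pyDigit c then digTail rest else c :: rest
  | [] => []

-- consume a nonempty digit run (underscores between digits); none if no leading digit
def digRun? : List Char → Option (List Char)
  | c :: rest => if pyDigit c then some (digTail rest) else none
  | [] => none

-- after the decimal point: optional digit run (must start with a digit to consume)
def afterDot : List Char → Option (List Char)
  | [] => some []
  | c :: rest => if pyDigit c then digRun? (c :: rest) else some (c :: rest)

def mantissa? (l : List Char) : Option (List Char) :=
  match l with
  | '.' :: rest => digRun? rest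
  | _ =>
    match digRun? l with
    | none => none
    | some r =>
      match r with
      | '.' :: rest2 => afterDot rest2
      | _ => some r

def expo? : List Char → Option (List Char)
  | [] => some []
  | c :: rest =>
    if c = 'e' ∨ c = 'E' then
      match rest with
      | s :: r2 => if s = '+' ∨ s = '-' then digRun? r2 else digRun? (s :: r2)
      | [] => none
    else some (c :: rest)

-- true iff Python's float(t) succeeds (t drawn from the ASCII token alphabet)
def pyFloatValid (t : List Char) : Bool :=
  let l := match t with
    | c :: r => if c = '+' ∨ c = '-' then r else t
    | [] => t
  let low := l.map Char.toLower
  if low = "inf".toList ∨ low = "infinity".toList ∨ low = "nan".toList then true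
  else
    match mantissa? l with
    | none => false
    | some r =>
      match expo? r with
      | none => false
      | some r2 => r2 = []

-- ===== PORT A =====
-- A's inner double-quote loop: copies backslash pairs, stops at '"'
def aDq : List Char → List Char × List Char
  | [] => ([], [])
  | ch :: rest =>
    if ch = '\\' then
      match rest with
      | c2 :: rest2 => ('\\' :: c2 :: (aDq rest2).1, (aDq rest2).2)
      | [] => (['\\'], [])
    else if ch = '"' then (['"'], rest)
    else (ch :: (aDq rest).1, (aDq rest).2)

-- A's inner single-quote loop: backslash pairs verbatim, ' closes as '"', '"' escaped
def aSq : List Char → List Char × List Char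
  | [] => ([], [])
  | ch :: rest =>
    if ch = '\\' then
      match rest with
      | c2 :: rest2 => ('\\' :: c2 :: (aSq rest2).1, (aSq rest2).2)
      | [] => (['\\'], [])
    else if ch = '\'' then (['"'], rest)
    else if ch = '"' then ('\\' :: '"' :: (aSq rest).1, (aSq rest).2)
    else (ch :: (aSq rest).1, (aSq rest).2)

lemma aDq_len : ∀ l : List Char, (aDq l).2.length ≤ l.length := by
  intro l
  fun_induction aDq l <;> simp_all <;> omega

lemma aSq_len : ∀ l : List Char, (aSq l).2.length ≤ l.length := by
  intro l
  fun_induction aSq l <;> simp_all <;> omega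

lemma notStop_of (c : Char) (h1 : ¬ c = '"') (h2 : ¬ c = '\'') (h3 : ¬ isStructChar c = true) :
    (!isStopChar c) = true := by
  simp [isStopChar, isStructChar, List.contains_append] at *
  simp_all [structChars]

lemma dropWhile_lt (c : Char) (rest : List Char) (h : (!isStopChar c) = true) :
    ((c :: rest).dropWhile (fun x => !isStopChar x)).length < (c :: rest).length := by
  rw [List.dropWhile]
  simp only [h]
  exact Nat.lt_succ_of_le (List.length_dropWhile_le _ _)

-- A's main loop, transliterated: emit-as-you-go over the string
def aMain : List Char → List Char
  | [] => []
  | c :: rest =>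
    if h1 : c = '"' then
      '"' :: ((aDq rest).1 ++ aMain (aDq rest).2)
    else if h2 : c = '\'' then
      '"' :: ((aSq rest).1 ++ aMain (aSq rest).2)
    else if h3 : isStructChar c then c :: aMain rest
    else
      let t := (c :: rest).takeWhile (fun x => !isStopChar x)
      let rest' := (c :: rest).dropWhile (fun x => !isStopChar x)
      (if t = "True".toList then "true".toList
       else if t = "False".toList then "false".toList
       else if t = "None".toList then "null".toList
       else if pyFloatValid t then t
       else '"' :: (t ++ ['"'])) ++ aMain rest'
  termination_by l => l.length
  decreasing_by
  · exact Nat.lt_succ_of_le (aDq_len rest)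
  · exact Nat.lt_succ_of_le (aSq_len rest)
  · simp
  · exact dropWhile_lt c rest (notStop_of c h1 h2 h3)

def python_repr_to_json_py (s : String) : String := String.mk (aMain s.toList)

-- ===== PORT B =====
-- a classified segment of the input
inductive Seg
  | dq : List Char → Bool → Seg
  | sq : List Char → Bool → Seg
  | struct : Char → Seg
  | bare : List Char → Seg
deriving DecidableEq, Repr

-- B's quoted-span boundary scan: (inner text, closed?, remainder)
def findQuote (q : Char) : List Char → List Char × Bool × List Char
  | [] => ([], false, [])
  | ch :: rest =>
    if ch = '\\' then
      match rest with
      | c2 :: rest2 =>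
        ('\\' :: c2 :: (findQuote q rest2).1, (findQuote q rest2).2.1, (findQuote q rest2).2.2)
      | [] => (['\\'], false, [])
    else if ch = q then ([], true, rest)
    else ((ch :: (findQuote q rest).1), (findQuote q rest).2.1, (findQuote q rest).2.2)

lemma findQuote_len : ∀ (q : Char) (l : List Char), (findQuote q l).2.2.length ≤ l.length := by
  intro q l
  fun_induction findQuote q l <;> simp_all <;> omega

-- B's scanner: boundaries and classification only, no output text
def bScan : List Char → List Seg
  | c :: rest =>
    if h : c = '"' ∨ c = '\'' then
      (if c = '"' then Seg.dq (findQuote c rest).1 (findQuote c rest).2.1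
       else Seg.sq (findQuote c rest).1 (findQuote c rest).2.1) :: bScan (findQuote c rest).2.2
    else if h3 : isStructChar c then Seg.struct c :: bScan rest
    else
      Seg.bare ((c :: rest).takeWhile (fun x => !isStopChar x)) ::
        bScan ((c :: rest).dropWhile (fun x => !isStopChar x))
  | [] => []
  termination_by l => l.length
  decreasing_by
  · exact Nat.lt_succ_of_le (findQuote_len c rest)
  · simp
  · exact dropWhile_lt c rest
      (notStop_of c (fun h1 => h (Or.inl h1)) (fun h2 => h (Or.inr h2)) h3)

-- B's _escape_dq: backslash pairs verbatim, bare '"' becomes '\"'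
def escapeDq : List Char → List Char
  | [] => []
  | ch :: rest =>
    if ch = '\\' then
      match rest with
      | c2 :: rest2 => '\\' :: c2 :: escapeDq rest2
      | [] => ['\\']
    else if ch = '"' then '\\' :: '"' :: escapeDq rest
    else ch :: escapeDq rest

-- B's _render
def renderSeg : Seg → List Char
  | .dq t closed => '"' :: (t ++ (if closed then ['"'] else []))
  | .sq t closed => '"' :: (escapeDq t ++ (if closed then ['"'] else []))
  | .struct c => [c]
  | .bare t =>
    if t = "True".toList then "true".toList
    else if t = "False".toList then "false".toList
    else if t = "None".toList then "null".toList
    else if pyFloatValid t then t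
    else '"' :: (t ++ ['"'])

def python_repr_to_json_py_alt (s : String) : String :=
  String.mk (((bScan s.toList).map renderSeg).flatten)

-- ===== PRECONDITION & SPEC =====
def Spec_python_repr_to_json_py (s : String) (out : String) : Prop := out = python_repr_to_json_py_alt s
instance (s : String) (out : String) : Decidable (Spec_python_repr_to_json_py s out) := by unfold Spec_python_repr_to_json_py; infer_instance

-- ===== CLAIM (what is proved, stated in full; the proofs are below) =====
def Claim_equal_python_repr_to_json_py : Prop := ∀ (s : String), Dom_python_repr_to_json_py s → Spec_python_repr_to_json_py s (python_repr_to_json_py s)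

-- ===== LEMMAS AND PROOFS =====

lemma findQuote_cons (q c : Char) (rest : List Char) (hc : ¬ c = '\\') :
    findQuote q (c :: rest) =
      if c = q then ([], true, rest)
      else (c :: (findQuote q rest).1, (findQuote q rest).2.1, (findQuote q rest).2.2) := by
  rw [findQuote.eq_def]; simp [hc]

lemma escapeDq_cons (c : Char) (t : List Char) (hc : ¬ c = '\\') (hq : ¬ c = '"') :
    escapeDq (c :: t) = c :: escapeDq t := by
  rw [escapeDq.eq_def]; simp [hc, hq]

lemma escapeDq_dq (t : List Char) : escapeDq ('"' :: t) = '\\' :: '"' :: escapeDq t := by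
  rw [escapeDq.eq_def]; simp

lemma aDq_eq (l : List Char) :
    aDq l = ((findQuote '"' l).1 ++ (if (findQuote '"' l).2.1 then ['"'] else []),
             (findQuote '"' l).2.2) := by
  fun_induction aDq l with
  | case1 => simp [findQuote]
  | case2 c2 rest2 ih => rw [findQuote]; simp [ih]
  | case3 => rw [findQuote]; simp
  | case4 rest => rw [findQuote_cons '"' '"' rest (by decide)]; simp
  | case5 c rest h1 h2 ih => rw [findQuote_cons '"' c rest h1]; simp [h2, ih]

lemma aSq_eq (l : List Char) :
    aSq l = (escapeDq (findQuote '\'' l).1 ++ (if (findQuote '\'' l).2.1 then ['"'] else []),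
             (findQuote '\'' l).2.2) := by
  fun_induction aSq l with
  | case1 => simp [findQuote, escapeDq]
  | case2 c2 rest2 ih => rw [findQuote]; simp [escapeDq, ih]
  | case3 => rw [findQuote]; simp [escapeDq]
  | case4 rest => rw [findQuote_cons '\'' '\'' rest (by decide)]; simp [escapeDq]
  | case5 rest ih => rw [findQuote_cons '\'' '"' rest (by decide)]; simp_all [escapeDq_dq]
  | case6 c rest h1 h2 h3 ih =>
      rw [findQuote_cons '\'' c rest h1]
      simp [h2, escapeDq_cons c _ h1 h3, ih]

lemma aMain_eq (l : List Char) : aMain l = ((bScan l).map renderSeg).flatten := by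
  fun_induction aMain l with
  | case1 => simp [bScan]
  | case2 rest ih =>
      rw [bScan]
      simp [renderSeg, aDq_eq, List.append_assoc] at ih ⊢
      rw [ih]
  | case3 rest h1 ih =>
      rw [bScan]
      simp [h1, renderSeg, aSq_eq, List.append_assoc] at ih ⊢
      rw [ih]
  | case4 c rest h1 h2 h3 ih =>
      rw [bScan]
      simp_all [renderSeg]
  | case5 c rest h1 h2 h3 ih =>
      rw [bScan]
      simp_all [renderSeg]
      try rfl

-- ===== VERDICT (by name: the statement is the Claim_ definition above) =====
theorem python_repr_to_json_py_spec : Claim_equal_python_repr_to_json_py := by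
  intro s _
  unfold Spec_python_repr_to_json_py python_repr_to_json_py python_repr_to_json_py_alt
  rw [aMain_eq]
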